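-- pv_equiv track=rewrite | github.com/klimmm/dash | data_files/form162/data_scrapping/scripts/scraper.py | assign_short_name
-- ===== SOURCE A (Python) =====
-- from typing import List, Tuple, Optional, Dict
--
-- def assign_short_name(original_name: str, name_mapping: Dict[str, str]) -> str:
--     """
--     Assign a short name based on the original filename and mapping.
--     Uses exact matching first, then falls back to substring matching with length prioritization.
--
--     Args:
--         original_name: The original filename to match
--         name_mapping: Dictionary mapping original names to short names
--
--     Returns:
--         str: The mapped short name or 'misc' if no match found
--     """
--     # Normalize the original name
--     original_name_lower = original_name.lower().strip()
--
--     # Try exact match first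
--     for key in name_mapping:
--         if key.lower().strip() == original_name_lower:
--             return name_mapping[key]
--
--     # Group mappings by their short names to handle conflicts
--     reverse_mapping = {}
--     for key, value in name_mapping.items():
--         if value not in reverse_mapping:
--             reverse_mapping[value] = []
--         reverse_mapping[value].append(key.lower())
--
--     # For each group of keys that map to the same short name
--     matches = []
--     for key in name_mapping:
--         key_lower = key.lower()
--         if key_lower in original_name_lower:
--             matches.append((key, len(key)))
--
--     # Sort matches by length (longest first)
--     matches.sort(key=lambda x: x[1], reverse=True)
--
--     # If we have matches, return the mapping for the longest matching key
--     if matches: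
--         return name_mapping[matches[0][0]]
--
--     return 'misc'
-- ===== SOURCE B (Python) =====
-- def assign_short_name(original_name: str, name_mapping: dict) -> str:
--     """Single pass over name_mapping: record the first exact match and the
--     earliest longest substring match; no reverse_mapping, no sort."""
--     original_name_lower = original_name.lower().strip()
--     exact_value = None
--     best_key = None
--     best_len = -1
--     for key in name_mapping:
--         key_lower = key.lower()
--         if exact_value is None and key_lower.strip() == original_name_lower:
--             exact_value = name_mapping[key]
--         if key_lower in original_name_lower and len(key) > best_len:
--             best_key = key
--             best_len = len(key)
--     if exact_value is not None:
--         return exact_value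
--     if best_key is not None:
--         return name_mapping[best_key]
--     return 'misc'
-- ===== Notes on version B (the rewrite author's own statement) =====
-- stated objective: simpler
-- what changed: One pass over name_mapping keeping two accumulators (first exact match, earliest strictly-longest substring match) replaces A's separate exact loop, dead reverse_mapping construction, matches list and stable sort.
import Mathlib
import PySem

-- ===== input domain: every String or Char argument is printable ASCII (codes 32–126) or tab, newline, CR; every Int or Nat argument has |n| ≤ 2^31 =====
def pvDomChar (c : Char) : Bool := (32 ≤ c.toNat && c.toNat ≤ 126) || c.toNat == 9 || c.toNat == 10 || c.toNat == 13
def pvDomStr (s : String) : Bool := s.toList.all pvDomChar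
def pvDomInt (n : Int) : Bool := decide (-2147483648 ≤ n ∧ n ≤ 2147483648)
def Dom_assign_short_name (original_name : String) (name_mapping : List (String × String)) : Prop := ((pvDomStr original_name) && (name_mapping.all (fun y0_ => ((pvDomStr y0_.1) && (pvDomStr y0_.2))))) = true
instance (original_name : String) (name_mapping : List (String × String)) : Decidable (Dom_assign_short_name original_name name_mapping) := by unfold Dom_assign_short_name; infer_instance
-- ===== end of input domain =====

-- B replaces A's sort-based matching (and its dead reverse_mapping pass) with one
-- accumulator pass keeping the first exact match and the earliest longest substring match: simpler.

-- ===== PORT A =====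
-- A's first loop: first key whose lower().strip() equals original_name_lower (early return)
def pvExactFirst (items : List (String × String)) (onl : String) : Option String :=
  match items with
  | [] => none
  | kv :: rest =>
    if PySem.Str.strip (PySem.Str.lower kv.1) == onl then some kv.1 else pvExactFirst rest onl

def assign_short_name (original_name : String) (name_mapping : List (String × String)) : String :=
  let d := PySem.Dict.ofList name_mapping
  let original_name_lower := PySem.Str.strip (PySem.Str.lower original_name)
  match pvExactFirst d.items original_name_lower with
  | some key => d.getD key ""   -- name_mapping[key]: key is a key of d, so the "" default is never used
  | none =>
    -- reverse_mapping is built by A and never used for the result; kept, unused, as in A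
    let _reverse_mapping : PySem.Dict String (List String) :=
      d.items.foldl (fun rd kv =>
        let rd' := if rd.contains kv.2 then rd else rd.insert kv.2 []
        rd'.modify kv.2 [] (fun ks => ks ++ [PySem.Str.lower kv.1])) PySem.Dict.empty
    let matches_ := d.items.foldl (fun acc kv =>
        if PySem.Str.isIn (PySem.Str.lower kv.1) original_name_lower then
          acc ++ [(kv.1, PySem.Str.len kv.1)] else acc) []
    let msorted := PySem.List.sorted matches_ (fun x => x.2) true
    match msorted with
    | [] => "misc"
    | m :: _ => d.getD m.1 ""   -- name_mapping[matches[0][0]]: again a present key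

-- ===== PORT B =====
-- one step of B's single loop; state = (exact_value, best_key, best_len)
def pvBStep (d : PySem.Dict String String) (onl : String)
    (st : Option String × Option String × Int) (kv : String × String) :
    Option String × Option String × Int :=
  let key_lower := PySem.Str.lower kv.1
  let ex := if st.1.isNone && (PySem.Str.strip key_lower == onl) then some (d.getD kv.1 "") else st.1
  if PySem.Str.isIn key_lower onl && decide (PySem.Str.len kv.1 > st.2.2) then
    (ex, some kv.1, PySem.Str.len kv.1)
  else
    (ex, st.2.1, st.2.2)

def assign_short_name_alt (original_name : String) (name_mapping : List (String × String)) : String :=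
  let d := PySem.Dict.ofList name_mapping
  let original_name_lower := PySem.Str.strip (PySem.Str.lower original_name)
  let st := d.items.foldl (pvBStep d original_name_lower) (none, none, -1)
  match st.1 with
  | some v => v
  | none =>
    match st.2.1 with
    | some key => d.getD key ""
    | none => "misc"

-- ===== PRECONDITION & SPEC =====
def Spec_assign_short_name (original_name : String) (name_mapping : List (String × String)) (out : String) : Prop := out = assign_short_name_alt original_name name_mapping
instance (original_name : String) (name_mapping : List (String × String)) (out : String) : Decidable (Spec_assign_short_name original_name name_mapping out) := by unfold Spec_assign_short_name; infer_instance

-- ===== CLAIM (what is proved, stated in full; the proofs are below) =====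
def Claim_equal_assign_short_name : Prop := ∀ (original_name : String) (name_mapping : List (String × String)), Dom_assign_short_name original_name name_mapping → Spec_assign_short_name original_name name_mapping (assign_short_name original_name name_mapping)

-- ===== LEMMAS AND PROOFS =====

-- "first maximum" step: keep the current best unless the new length is strictly greater
def pvFM (b : Option (String × Int)) (m : String × Int) : Option (String × Int) :=
  match b with
  | none => some m
  | some b' => if m.2 > b'.2 then some m else some b'

-- B's (best_key, best_len) pair, viewed as an optional best match
def pvEnc : Option (String × Int) → Option String × Int
  | none => (none, -1)
  | some (k, n) => (some k, n)

theorem pvBStep_fst (d : PySem.Dict String String) (onl : String) (st : Option String × Option String × Int) (kv : String × String) :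
    (pvBStep d onl st kv).1 =
      if st.1.isNone && (PySem.Str.strip (PySem.Str.lower kv.1) == onl) then some (d.getD kv.1 "") else st.1 := by
  simp only [pvBStep]; split <;> rfl

theorem pvBStep_snd (d : PySem.Dict String String) (onl : String) (st : Option String × Option String × Int) (kv : String × String) :
    (pvBStep d onl st kv).2 =
      if PySem.Str.isIn (PySem.Str.lower kv.1) onl && decide (PySem.Str.len kv.1 > st.2.2) then
        (some kv.1, PySem.Str.len kv.1)
      else st.2 := by
  simp only [pvBStep]; split <;> rfl

-- the first component of B's fold is A's exact-match loop (looked up in d)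
theorem pvBfold_fst (d : PySem.Dict String String) (onl : String) :
    ∀ (l : List (String × String)) (st : Option String × Option String × Int),
      (l.foldl (pvBStep d onl) st).1 =
        (match st.1 with
         | some v => some v
         | none => (pvExactFirst l onl).map (fun k => d.getD k "")) := by
  intro l
  induction l with
  | nil => intro st; cases h : st.1 <;> simp [pvExactFirst, h]
  | cons kv rest ih =>
    intro st
    rw [List.foldl_cons, ih]
    cases h : st.1 with
    | some v =>
      have h1 : (pvBStep d onl st kv).1 = some v := by rw [pvBStep_fst, h]; simp
      rw [h1]
    | none =>
      rw [pvBStep_fst, h]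
      by_cases hc : (PySem.Str.strip (PySem.Str.lower kv.1) == onl) = true
      · simp [hc, pvExactFirst]
      · simp only [Bool.not_eq_true] at hc
        simp [hc, pvExactFirst]

-- the second component of B's fold is the running strict first-max over A's matches list
theorem pvBfold_snd (d : PySem.Dict String String) (onl : String) :
    ∀ (l : List (String × String)) (st : Option String × Option String × Int) (o : Option (String × Int)),
      st.2 = pvEnc o →
      (l.foldl (pvBStep d onl) st).2 =
        pvEnc (((l.filter (fun kv => PySem.Str.isIn (PySem.Str.lower kv.1) onl)).map
                  (fun kv => (kv.1, PySem.Str.len kv.1))).foldl pvFM o) := by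
  intro l
  induction l with
  | nil => intro st o hst; simpa using hst
  | cons kv rest ih =>
    intro st o hst
    rw [List.foldl_cons]
    by_cases hin : PySem.Str.isIn (PySem.Str.lower kv.1) onl = true
    · have hlen : (0 : Int) ≤ PySem.Str.len kv.1 := by
        rw [PySem.Str.len_eq]; exact Int.natCast_nonneg _
      cases o with
      | none =>
        have hsnd : (pvBStep d onl st kv).2 = pvEnc (some (kv.1, PySem.Str.len kv.1)) := by
          rw [pvBStep_snd, hst]
          have : decide (PySem.Str.len kv.1 > (pvEnc (none : Option (String × Int))).2) = true := by
            simp [pvEnc]; omega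
          rw [hin, this]; rfl
        rw [ih _ _ hsnd]
        simp only [PySem.Str.isIn_eq, PySem.Str.toList_lower] at hin
        simp [hin, pvFM]
      | some b =>
        by_cases hgt : PySem.Str.len kv.1 > b.2
        · have hsnd : (pvBStep d onl st kv).2 = pvEnc (some (kv.1, PySem.Str.len kv.1)) := by
            rw [pvBStep_snd, hst]
            have : decide (PySem.Str.len kv.1 > (pvEnc (some b)).2) = true := by
              cases b; simpa [pvEnc] using hgt
            rw [hin, this]; rfl
          rw [ih _ _ hsnd]
          simp only [PySem.Str.isIn_eq, PySem.Str.toList_lower] at hin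
          have hgt' : b.2 < (kv.1.length : Int) := by
            simpa [PySem.Str.len_eq] using hgt
          simp [hin, pvFM, hgt']
        · have hsnd : (pvBStep d onl st kv).2 = pvEnc (some b) := by
            rw [pvBStep_snd, hst]
            have : decide (PySem.Str.len kv.1 > (pvEnc (some b)).2) = false := by
              cases b; simpa [pvEnc] using hgt
            rw [hin, this]; simp
          rw [ih _ _ hsnd]
          simp only [PySem.Str.isIn_eq, PySem.Str.toList_lower] at hin
          have hgt' : ¬ b.2 < (kv.1.length : Int) := by
            simpa [PySem.Str.len_eq] using hgt
          simp [hin, pvFM, hgt']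
    · have hsnd : (pvBStep d onl st kv).2 = pvEnc o := by
        rw [pvBStep_snd, hst]
        simp only [Bool.not_eq_true] at hin
        rw [hin]; simp
      rw [ih _ _ hsnd]
      simp only [PySem.Str.isIn_eq, PySem.Str.toList_lower] at hin
      simp [hin]

theorem pvInsertBy_head (x : String × Int) (acc : List (String × Int)) :
    (PySem.List.insertBy (fun a b => decide (b.2 < a.2)) x acc).head? = pvFM acc.head? x := by
  cases acc with
  | nil => simp [PySem.List.insertBy, pvFM]
  | cons y ys =>
    simp only [PySem.List.insertBy, pvFM, List.head?_cons]
    by_cases h : y.2 < x.2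
    · simp [h]
    · have h2 : ¬ x.2 > y.2 := by omega
      simp [h2]

-- the head of A's reverse-stably-sorted matches list is the running first strict max
theorem pvSorted_head (ms : List (String × Int)) :
    (PySem.List.sorted ms (fun x => x.2) true).head? = ms.foldl pvFM none := by
  rw [PySem.List.sorted_rev_eq_foldl_insertBy]
  have key : ∀ (l : List (String × Int)) (acc : List (String × Int)),
      (l.foldl (fun acc x => PySem.List.insertBy (fun a b => decide (b.2 < a.2)) x acc) acc).head?
        = l.foldl pvFM acc.head? := by
    intro l
    induction l with
    | nil => intro acc; simp
    | cons m rest ih =>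
      intro acc
      rw [List.foldl_cons, List.foldl_cons, ih, pvInsertBy_head]
  simpa using key ms []

-- A's and B's bodies agree for any dict d, normalized name onl, and items list l
theorem pvCore (d : PySem.Dict String String) (onl : String) (l : List (String × String)) :
    (match pvExactFirst l onl with
     | some key => d.getD key ""
     | none =>
       match PySem.List.sorted (l.foldl (fun acc kv =>
           if PySem.Str.isIn (PySem.Str.lower kv.1) onl then
             acc ++ [(kv.1, PySem.Str.len kv.1)] else acc) []) (fun x => x.2) true with
       | [] => "misc"
       | m :: _ => d.getD m.1 "") =
    (match (l.foldl (pvBStep d onl) (none, none, -1)).1 with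
     | some v => v
     | none =>
       match (l.foldl (pvBStep d onl) (none, none, -1)).2.1 with
       | some key => d.getD key ""
       | none => "misc") := by
  have hfst := pvBfold_fst d onl l (none, none, -1)
  have hsnd := pvBfold_snd d onl l (none, none, -1) none rfl
  have hmatch : l.foldl (fun acc kv =>
      if PySem.Str.isIn (PySem.Str.lower kv.1) onl then
        acc ++ [(kv.1, PySem.Str.len kv.1)] else acc) [] =
      (l.filter (fun kv => PySem.Str.isIn (PySem.Str.lower kv.1) onl)).map
        (fun kv => (kv.1, PySem.Str.len kv.1)) := by
    simpa using PySem.List.foldl_append_if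
      (fun kv => PySem.Str.isIn (PySem.Str.lower kv.1) onl)
      (fun kv => (kv.1, PySem.Str.len kv.1)) l []
  rw [hmatch]
  cases hex : pvExactFirst l onl with
  | some k =>
    simp only [hex, Option.map_some] at hfst
    rw [hfst]
  | none =>
    simp only [hex, Option.map_none] at hfst
    rw [hfst]
    have hhead := pvSorted_head ((l.filter (fun kv => PySem.Str.isIn (PySem.Str.lower kv.1) onl)).map
        (fun kv => (kv.1, PySem.Str.len kv.1)))
    cases hfm : ((l.filter (fun kv => PySem.Str.isIn (PySem.Str.lower kv.1) onl)).map
        (fun kv => (kv.1, PySem.Str.len kv.1))).foldl pvFM none with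
    | none =>
      rw [hfm] at hhead hsnd
      rw [List.head?_eq_none_iff] at hhead
      rw [hhead, hsnd]
      rfl
    | some m =>
      rw [hfm] at hhead hsnd
      obtain ⟨t, ht⟩ := List.head?_eq_some_iff.mp hhead
      rw [ht, hsnd]
      cases m with
      | mk k n => rfl

-- ===== VERDICT (by name: the statement is the Claim_ definition above) =====
theorem assign_short_name_spec : Claim_equal_assign_short_name := by
  intro original_name name_mapping _
  unfold Spec_assign_short_name assign_short_name assign_short_name_alt
  exact pvCore _ _ _
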